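-- pv_equiv track=rewrite | github.com/tlettsilveiro1/Estructura-de-Datos | practica2c-conjuntos-tlettsilveiro1-main/ejercicio4.py | calcular_felicidad
-- ===== SOURCE A (Python) =====
-- def calcular_felicidad(lista, conjuntoA, conjuntoB):
--     felicidad = 0
--     for x in lista:
--         if x in conjuntoA:
--             felicidad += 1
--         elif x in conjuntoB:
--             felicidad -= 1
--         # Si no está en ninguno, no cambia la felicidad
--     return felicidad
-- ===== SOURCE B (Python) =====
-- def calcular_felicidad(lista, conjuntoA, conjuntoB):
--     # Build a frequency table once, then walk the DISTINCT elements,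
--     # weighting each by its multiplicity.
--     freq = {}
--     for x in lista:
--         freq[x] = freq.get(x, 0) + 1
--     total = 0
--     for x, c in freq.items():
--         if x in conjuntoA:
--             total += c
--         elif x in conjuntoB:
--             total -= c
--     return total
-- ===== Notes on version B (the rewrite author's own statement) =====
-- stated objective: alternative
-- what changed: B builds a frequency table of the list once and then iterates over the distinct (element, count) pairs, adding or subtracting the whole multiplicity at once, instead of A's element-by-element scan of the list.
import Mathlib
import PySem

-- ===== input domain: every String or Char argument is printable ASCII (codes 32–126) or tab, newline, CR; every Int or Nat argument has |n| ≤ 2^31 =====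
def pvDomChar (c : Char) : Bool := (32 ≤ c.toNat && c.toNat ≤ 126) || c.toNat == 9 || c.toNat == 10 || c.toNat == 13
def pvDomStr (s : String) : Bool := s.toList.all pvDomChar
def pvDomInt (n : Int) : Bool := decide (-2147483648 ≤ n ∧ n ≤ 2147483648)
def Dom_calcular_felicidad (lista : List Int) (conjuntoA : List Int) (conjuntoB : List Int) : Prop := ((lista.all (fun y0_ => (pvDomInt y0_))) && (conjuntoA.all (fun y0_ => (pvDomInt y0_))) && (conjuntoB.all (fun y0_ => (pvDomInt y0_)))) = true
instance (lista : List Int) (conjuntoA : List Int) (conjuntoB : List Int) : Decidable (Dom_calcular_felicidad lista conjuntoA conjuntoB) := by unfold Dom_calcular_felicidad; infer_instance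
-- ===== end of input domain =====

-- B replaces A's element-by-element scan by a frequency-table pass over the distinct elements (objective: alternative).

-- ===== PORT A =====
def calcular_felicidad (lista : List Int) (conjuntoA : List Int) (conjuntoB : List Int) : Int :=
  lista.foldl (fun felicidad x =>
    if x ∈ conjuntoA then felicidad + 1
    else if x ∈ conjuntoB then felicidad - 1
    else felicidad) 0

-- ===== PORT B =====
def calcular_felicidad_alt (lista : List Int) (conjuntoA : List Int) (conjuntoB : List Int) : Int :=
  let freq : PySem.Dict Int Int := lista.foldl (fun d x => d.insert x (d.getD x 0 + 1)) PySem.Dict.empty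
  freq.items.foldl (fun total p =>
    if p.1 ∈ conjuntoA then total + p.2
    else if p.1 ∈ conjuntoB then total - p.2
    else total) 0

-- ===== PRECONDITION & SPEC =====
def Spec_calcular_felicidad (lista : List Int) (conjuntoA : List Int) (conjuntoB : List Int) (out : Int) : Prop := out = calcular_felicidad_alt lista conjuntoA conjuntoB
instance (lista : List Int) (conjuntoA : List Int) (conjuntoB : List Int) (out : Int) : Decidable (Spec_calcular_felicidad lista conjuntoA conjuntoB out) := by unfold Spec_calcular_felicidad; infer_instance

-- ===== CLAIM (what is proved, stated in full; the proofs are below) =====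
def Claim_equal_calcular_felicidad : Prop := ∀ (lista : List Int) (conjuntoA : List Int) (conjuntoB : List Int), Dom_calcular_felicidad lista conjuntoA conjuntoB → Spec_calcular_felicidad lista conjuntoA conjuntoB (calcular_felicidad lista conjuntoA conjuntoB)

-- ===== LEMMAS AND PROOFS =====

-- weight of one element under the A-over-B priority
def pvWeight (conjuntoA conjuntoB : List Int) (x : Int) : Int :=
  if x ∈ conjuntoA then 1 else if x ∈ conjuntoB then -1 else 0

-- A's loop is init + sum of weights
theorem pvFoldA (conjuntoA conjuntoB : List Int) :
    ∀ (l : List Int) (init : Int),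
      l.foldl (fun felicidad x =>
        if x ∈ conjuntoA then felicidad + 1
        else if x ∈ conjuntoB then felicidad - 1
        else felicidad) init = init + (l.map (pvWeight conjuntoA conjuntoB)).sum := by
  intro l
  induction l with
  | nil => intro init; simp
  | cons x t ih =>
    intro init
    simp only [List.foldl_cons, List.map_cons, List.sum_cons, ih, pvWeight]
    split_ifs <;> ring

-- B's loop over (key, count) pairs is init + sum of weight·count
theorem pvFoldB (conjuntoA conjuntoB : List Int) (cnt : Int → Int) :
    ∀ (K : List Int) (init : Int),
      ((K.map (fun k => (k, cnt k))).foldl (fun total p =>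
        if p.1 ∈ conjuntoA then total + p.2
        else if p.1 ∈ conjuntoB then total - p.2
        else total) init) = init + (K.map (fun k => pvWeight conjuntoA conjuntoB k * cnt k)).sum := by
  intro K
  induction K with
  | nil => intro init; simp
  | cons k t ih =>
    intro init
    simp only [List.map_cons, List.foldl_cons, List.sum_cons, ih, pvWeight]
    split_ifs <;> ring

theorem pvSumCounts (w : Int → Int) (l : List Int) :
    ((PySem.Set.ofList l).map (fun k => w k * l.count k)).sum = (l.map w).sum := by
  have hnd : (PySem.Set.ofList l).Nodup := PySem.Set.nodup_ofList l
  have hfin : (PySem.Set.ofList l).toFinset = l.toFinset := by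
    ext x
    simp [List.mem_toFinset, PySem.Set.mem_ofList]
  calc ((PySem.Set.ofList l).map (fun k => w k * l.count k)).sum
      = ∑ k ∈ (PySem.Set.ofList l).toFinset, w k * l.count k := (List.sum_toFinset _ hnd).symm
    _ = ∑ k ∈ l.toFinset, l.count k • w k := by
        rw [hfin]; refine Finset.sum_congr rfl (fun k _ => ?_)
        simp [mul_comm]
    _ = (l.map w).sum := (Finset.sum_list_map_count l w).symm

-- ===== VERDICT (by name: the statement is the Claim_ definition above) =====
theorem calcular_felicidad_spec : Claim_equal_calcular_felicidad := by
  intro lista conjuntoA conjuntoB _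
  unfold Spec_calcular_felicidad calcular_felicidad calcular_felicidad_alt
  dsimp only
  rw [PySem.Dict.foldl_insert_getD_add_one_eq_counter, PySem.Dict.items_counter,
      pvFoldA, pvFoldB, pvSumCounts]
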